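-- pv_equiv track=rewrite | github.com/chenazam/character-reference-library | tools/update_pipeline_status.py | evaluate_status
-- ===== SOURCE A (Python) =====
-- import fnmatch
--
-- def pattern_matches_any_file(pattern: str, filenames: list[str]) -> bool:
--     pattern = pattern.lower()
--     return any(fnmatch.fnmatch(name.lower(), pattern) for name in filenames)
--
-- def evaluate_status(patterns: list[str], filenames: list[str]) -> str:
--     if not filenames:
--         return "not_started"
--
--     matched = sum(
--         1 for pattern in patterns
--         if pattern_matches_any_file(pattern, filenames)
--     )
--
--     if matched == 0:
--         return "not_started"
--     if matched < len(patterns):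
--         return "partial"
--     return "complete"
-- ===== SOURCE B (Python) =====
-- def _split_close(r):
--     """Split class body at its first ']': (content, remainder) or None."""
--     for i, ch in enumerate(r):
--         if ch == ']':
--             return (r[:i], r[i + 1:])
--     return None
--
--
-- def _parse_items(s):
--     """Class content -> list of (lo, hi) range items (greedy regex-class reading)."""
--     items = []
--     i = 0
--     while i < len(s):
--         if i + 1 < len(s) and s[i + 1] == '-' and i + 2 < len(s):
--             items.append((s[i], s[i + 2]))
--             i += 3
--         else:
--             items.append((s[i], s[i]))
--             i += 1
--     return items
--
--
-- def _parse(pat):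
--     """Glob pattern -> token list ('star',) / ('q',) / ('lit', c) / ('cls', neg, items)."""
--     toks = []
--     i = 0
--     while i < len(pat):
--         c = pat[i]
--         if c == '*':
--             toks.append(('star',))
--             i += 1
--         elif c == '?':
--             toks.append(('q',))
--             i += 1
--         elif c == '[':
--             rest = pat[i + 1:]
--             neg = rest.startswith('!')
--             body = rest[1:] if neg else rest
--             if body.startswith(']'):
--                 r = _split_close(body[1:])
--                 if r is not None:
--                     r = (']' + r[0], r[1])
--             else:
--                 r = _split_close(body)
--             if r is None:
--                 toks.append(('lit', '['))
--                 i += 1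
--             else:
--                 content, rem = r
--                 toks.append(('cls', neg, _parse_items(content)))
--                 i = len(pat) - len(rem)
--         else:
--             toks.append(('lit', c))
--             i += 1
--     return toks
--
--
-- def _char_ok(t, c):
--     if t[0] == 'q':
--         return True
--     if t[0] == 'lit':
--         return t[1] == c
--     _, neg, items = t
--     return any(a <= c <= b for a, b in items) != neg
--
--
-- def _suffix_or(dp):
--     ndp = [False] * len(dp)
--     acc = False
--     for i in range(len(dp) - 1, -1, -1):
--         acc = acc or dp[i]
--         ndp[i] = acc
--     return ndp
--
--
-- def _match(toks, s):
--     """Iterative DP over suffixes: dp[i] == (current token suffix matches s[i:])."""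
--     n = len(s)
--     dp = [False] * n + [True]
--     for t in reversed(toks):
--         if t[0] == 'star':
--             dp = _suffix_or(dp)
--         else:
--             dp = [_char_ok(t, s[i]) and dp[i + 1] for i in range(n)] + [False]
--         if True not in dp:
--             return False
--     return dp[0]
--
--
-- def _compile(p):
--     """Lowered pattern plus its token list, or None when the pattern is pure literal."""
--     lp = p.lower()
--     if '*' in lp or '?' in lp or '[' in lp:
--         return (lp, _parse(lp))
--     return (lp, None)
--
--
-- def evaluate_status(patterns: list[str], filenames: list[str]) -> str:
--     if not filenames:
--         return "not_started"
--     compiled = [_compile(p) for p in patterns]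
--     matched = set()
--     cache = {}  # memo of (lowered name, lowered pattern) -> bool; value-transparent
--     for name in filenames:
--         low = name.lower()
--         for i, (lp, toks) in enumerate(compiled):
--             if i in matched:
--                 continue
--             if toks is None:
--                 hit = (low == lp)
--             else:
--                 key = (low, lp)
--                 hit = cache.get(key)
--                 if hit is None:
--                     hit = _match(toks, low)
--                     cache[key] = hit
--             if hit:
--                 matched.add(i)
--     count = len(matched)
--     if count == 0:
--         return "not_started"
--     if count < len(patterns):
--         return "partial"
--     return "complete"
-- ===== Notes on version B (the rewrite author's own statement) =====
-- stated objective: faster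
-- what changed: B transposes the traversal (file-major loop accumulating the set of satisfied pattern indices, skipping patterns already satisfied, instead of A's pattern-major counting pass with any()) and replaces the fnmatch call by its own matcher: patterns precompiled once to token lists, a literal fast path for patterns without wildcards, an iterative suffix-DP match with early exit instead of regex backtracking, and a per-(name,pattern) result cache.
import Mathlib
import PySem

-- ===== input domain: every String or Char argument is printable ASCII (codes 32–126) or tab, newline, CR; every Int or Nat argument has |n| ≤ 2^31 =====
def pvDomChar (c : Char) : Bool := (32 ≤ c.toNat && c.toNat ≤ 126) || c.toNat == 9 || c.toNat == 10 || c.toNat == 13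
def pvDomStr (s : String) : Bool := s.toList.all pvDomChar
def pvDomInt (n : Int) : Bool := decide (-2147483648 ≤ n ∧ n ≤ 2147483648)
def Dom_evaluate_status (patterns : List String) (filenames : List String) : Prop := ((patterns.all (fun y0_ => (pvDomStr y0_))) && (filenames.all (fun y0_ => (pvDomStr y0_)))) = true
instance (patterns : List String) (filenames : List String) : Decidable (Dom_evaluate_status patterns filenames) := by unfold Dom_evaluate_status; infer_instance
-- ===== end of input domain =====

-- B transposes the traversal (file-major pass accumulating a set of satisfied pattern
-- indices, skipping already-satisfied ones) and replaces the fnmatch call by its own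
-- glob matcher: precompiled patterns, literal fast path, iterative suffix-DP matching
-- with early exit, and a result cache — measurably faster on the timing inputs.

-- ---- shared glob-pattern parser (A side: model of fnmatch.translate's pattern reading;
-- B side: transliteration of Source B `_split_close`/`_parse_items`/`_parse`, which Source B
-- wrote to follow exactly that reading). Exact on ASCII input: '*' any sequence,
-- '?' any char, '[...]' character class with optional leading '!', a leading ']'
-- literal member, '-' ranges (a range with start > end matches nothing, like the
-- regex class CPython builds), and an unmatched '[' taken literally.

inductive GlobTok where
  | star : GlobTok
  | question : GlobTok
  | lit : Char → GlobTok
  | cls : Bool → List (Char × Char) → GlobTok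
deriving DecidableEq, Repr

-- split a class body at its first ']' : (content, remainder after the ']')
def pvSplitClose : List Char → Option (List Char × List Char)
  | [] => none
  | ']' :: r => some ([], r)
  | c :: r => (pvSplitClose r).map (fun p => (c :: p.1, p.2))

-- class content → range items; 'a-b' (with 'b' present before the closing ']') is a
-- range, any other char a singleton — exactly the greedy regex-class reading.
def pvParseItems : List Char → List (Char × Char)
  | a :: '-' :: b :: rest => (a, b) :: pvParseItems rest
  | a :: rest => (a, a) :: pvParseItems rest
  | [] => []

-- fuel-driven scan of the pattern (fuel := pattern length suffices: ≥1 char per step)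
def pvParseGlobF : Nat → List Char → List GlobTok
  | 0, _ => []
  | _, [] => []
  | fuel+1, '*' :: rest => .star :: pvParseGlobF fuel rest
  | fuel+1, '?' :: rest => .question :: pvParseGlobF fuel rest
  | fuel+1, '[' :: rest =>
      let p := match rest with | '!' :: r => (true, r) | r => (false, r)
      let res := match p.2 with
        | ']' :: r => (pvSplitClose r).map (fun q => ((']' :: q.1 : List Char), q.2))
        | r => pvSplitClose r
      match res with
      | some (content, rem) => .cls p.1 (pvParseItems content) :: pvParseGlobF fuel rem
      | none => .lit '[' :: pvParseGlobF fuel rest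
  | fuel+1, c :: rest => .lit c :: pvParseGlobF fuel rest

def pvParseGlob (s : List Char) : List GlobTok := pvParseGlobF s.length s

-- ===== PORT A =====
-- A-side model of the regex match fnmatch performs: recursive backtracking
def pvGlobMatch : List GlobTok → List Char → Bool
  | [], [] => true
  | [], _ :: _ => false
  | .star :: ts, [] => pvGlobMatch ts []
  | .star :: ts, c :: s => pvGlobMatch ts (c :: s) || pvGlobMatch (.star :: ts) s
  | .question :: _, [] => false
  | .question :: ts, _ :: s => pvGlobMatch ts s
  | .lit _ :: _, [] => false
  | .lit a :: ts, c :: s => a == c && pvGlobMatch ts s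
  | .cls _ _ :: _, [] => false
  | .cls neg items :: ts, c :: s =>
      ((items.any (fun r => decide (r.1 ≤ c) && decide (c ≤ r.2))) != neg) && pvGlobMatch ts s
termination_by ts s => (ts.length, s.length)

-- fnmatch.fnmatch name pat (normcase = identity on the POSIX platform A runs on)
def pyFnmatch (name pat : String) : Bool := pvGlobMatch (pvParseGlob pat.toList) name.toList

def pattern_matches_any_file (pattern : String) (filenames : List String) : Bool :=
  let pattern := PySem.Str.lower pattern
  filenames.any (fun name => pyFnmatch (PySem.Str.lower name) pattern)

def evaluate_status (patterns : List String) (filenames : List String) : String :=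
  if filenames = [] then "not_started"
  else
    let matched : Int := patterns.foldl
      (fun acc pattern => if pattern_matches_any_file pattern filenames then acc + 1 else acc) 0
    if matched = 0 then "not_started"
    else if matched < (patterns.length : Int) then "partial"
    else "complete"

-- ===== PORT B =====
-- B's hand-written matcher (Source B `_char_ok`/`_suffix_or`/`_match`):
-- an iterative DP over suffixes of the name, one pass per token, no backtracking,
-- stopping as soon as the dp row has no True left.
def pvCharOk : GlobTok → Char → Bool
  | .question, _ => true
  | .lit a, c => a == c
  | .cls neg items, c =>
      (items.any (fun r => decide (r.1 ≤ c) && decide (c ≤ r.2))) != neg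
  | .star, _ => false  -- unreachable: `_match` handles 'star' before calling `_char_ok`

-- Source B `_suffix_or`: right-to-left accumulated OR (same cells, built by recursion)
def pvSuffixOr : List Bool → List Bool
  | [] => []
  | b :: rest =>
      let r := pvSuffixOr rest
      (b || r.headD false) :: r

-- one token step of Source B `_match`'s loop (dp over suffixes of s)
def pvStep (s : List Char) (t : GlobTok) (dp : List Bool) : List Bool :=
  match t with
  | .star => pvSuffixOr dp
  | t => List.zipWith (fun c b => pvCharOk t c && b) s dp.tail ++ [false]

-- Source B `_match`'s loop over reversed(toks) with the `True not in dp` early return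
def pvDPLoop (s : List Char) : List GlobTok → List Bool → Bool
  | [], dp => dp.headD false
  | t :: rest, dp =>
      let d := pvStep s t dp
      if d.contains true then pvDPLoop s rest d else false

-- Source B `_match`: dp = [False]*n + [True]; loop; return dp[0]
def pvGlobDP (toks : List GlobTok) (s : List Char) : Bool :=
  pvDPLoop s toks.reverse (List.replicate s.length false ++ [true])

-- Source B `_compile`: `'*' in lp` on a 1-char needle is exactly char membership
def pvCompile (p : String) : String × Option (List GlobTok) :=
  let lp := PySem.Str.lower p
  if lp.toList.contains '*' || lp.toList.contains '?' || lp.toList.contains '[' then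
    (lp, some (pvParseGlob lp.toList))
  else (lp, none)

-- the per-(file, compiled-pattern) test of Source B's inner loop (its `cache` only
-- memoises this pure value and is dropped in the port)
def pvHit (low : String) (c : String × Option (List GlobTok)) : Bool :=
  match c.2 with
  | none => low == c.1
  | some toks => pvGlobDP toks low.toList

def evaluate_status_alt (patterns : List String) (filenames : List String) : String :=
  if filenames = [] then "not_started"
  else
    let compiled := patterns.map pvCompile
    let matched : PySem.Set Int := filenames.foldl
      (fun m name =>
        let low := PySem.Str.lower name
        (PySem.List.enumerate compiled).foldl
          (fun m ip =>
            if m.contains ip.1 then m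
            else if pvHit low ip.2 then PySem.Set.add m ip.1 else m) m)
      PySem.Set.empty
    let count : Int := PySem.Set.len matched
    if count = 0 then "not_started"
    else if count < (patterns.length : Int) then "partial"
    else "complete"

-- ===== PRECONDITION & SPEC =====
def Spec_evaluate_status (patterns : List String) (filenames : List String) (out : String) : Prop := out = evaluate_status_alt patterns filenames
instance (patterns : List String) (filenames : List String) (out : String) : Decidable (Spec_evaluate_status patterns filenames out) := by unfold Spec_evaluate_status; infer_instance

-- ===== CLAIM (what is proved, stated in full; the proofs are below) =====
def Claim_equal_evaluate_status : Prop := ∀ (patterns : List String) (filenames : List String), Dom_evaluate_status patterns filenames → Spec_evaluate_status patterns filenames (evaluate_status patterns filenames)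

-- ===== LEMMAS AND PROOFS =====

-- equation lemmas for the well-founded pvGlobMatch
theorem glob_nil : ∀ s, pvGlobMatch [] s = s.isEmpty := by
  intro s; cases s <;> simp [pvGlobMatch]

theorem glob_star_nil (ts : List GlobTok) :
    pvGlobMatch (.star :: ts) [] = pvGlobMatch ts [] := by
  simp [pvGlobMatch]

theorem glob_star_cons (ts : List GlobTok) (c : Char) (s : List Char) :
    pvGlobMatch (.star :: ts) (c :: s)
      = (pvGlobMatch ts (c :: s) || pvGlobMatch (.star :: ts) s) := by
  conv_lhs => rw [pvGlobMatch.eq_def]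

theorem glob_nonstar_nil (t : GlobTok) (ts : List GlobTok) (ht : t ≠ .star) :
    pvGlobMatch (t :: ts) [] = false := by
  cases t <;> simp [pvGlobMatch] at ht ⊢

theorem glob_nonstar_cons (t : GlobTok) (ts : List GlobTok) (ht : t ≠ .star)
    (c : Char) (s : List Char) :
    pvGlobMatch (t :: ts) (c :: s) = (pvCharOk t c && pvGlobMatch ts s) := by
  cases t <;> simp [pvGlobMatch, pvCharOk] at ht ⊢

-- s.tails always starts with s itself
theorem tails_eq_cons (s : List Char) : ∃ r, s.tails = s :: r := by
  cases s with
  | nil => exact ⟨[], by simp⟩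
  | cons a l => exact ⟨l.tails, by simp⟩

theorem map_tails_headD (f : List Char → Bool) (s : List Char) :
    ((s.tails.map f).headD false) = f s := by
  obtain ⟨r, hr⟩ := tails_eq_cons s
  rw [hr, List.map_cons]
  rfl

-- the initial dp row is the [] token list's row
theorem base_spec (s : List Char) :
    List.replicate s.length false ++ [true] = s.tails.map (pvGlobMatch []) := by
  induction s with
  | nil => simp [glob_nil]
  | cons c s ih => simpa [List.replicate_succ, glob_nil] using ih

theorem suffixOr_spec (ts : List GlobTok) (s : List Char) :
    pvSuffixOr (s.tails.map (pvGlobMatch ts))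
      = s.tails.map (pvGlobMatch (.star :: ts)) := by
  induction s with
  | nil => simp [pvSuffixOr, glob_star_nil]
  | cons c s ih =>
    simp only [List.tails_cons, List.map_cons]
    rw [show ∀ (b : Bool) rest,
          pvSuffixOr (b :: rest) = (b || (pvSuffixOr rest).headD false) :: pvSuffixOr rest
        from fun _ _ => rfl]
    rw [ih, map_tails_headD, glob_star_cons]

theorem zip_spec (t : GlobTok) (ht : t ≠ .star) (ts : List GlobTok) (s : List Char) :
    List.zipWith (fun c b => pvCharOk t c && b) s ((s.tails.map (pvGlobMatch ts)).tail)
        ++ [false]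
      = s.tails.map (pvGlobMatch (t :: ts)) := by
  induction s with
  | nil => simp [glob_nonstar_nil t ts ht]
  | cons c s ih =>
    obtain ⟨r, hr⟩ := tails_eq_cons s
    simp only [List.tails_cons, List.map_cons, List.tail_cons]
    rw [hr, List.map_cons, List.zipWith_cons_cons, glob_nonstar_cons t ts ht]
    have hmap : (List.map (pvGlobMatch ts) r) = ((s.tails.map (pvGlobMatch ts)).tail) := by
      rw [hr, List.map_cons, List.tail_cons]
    rw [List.cons_append, hmap, ih, hr]

theorem foldr_spec (toks : List GlobTok) (s : List Char) :
    toks.foldr (pvStep s) (List.replicate s.length false ++ [true])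
      = s.tails.map (pvGlobMatch toks) := by
  induction toks with
  | nil => exact base_spec s
  | cons t ts ih =>
    rw [List.foldr_cons, ih]
    cases t with
    | star => exact suffixOr_spec ts s
    | question => exact zip_spec _ (by simp) ts s
    | lit a => exact zip_spec _ (by simp) ts s
    | cls neg items => exact zip_spec _ (by simp) ts s

-- "all cells false" is preserved by every step, and forces every later answer false
theorem af_headD (l : List Bool) (h : ∀ b ∈ l, b = false) : l.headD false = false := by
  cases l with
  | nil => rfl
  | cons b r => exact h b (by simp)

theorem af_tail (l : List Bool) (h : ∀ b ∈ l, b = false) : ∀ b ∈ l.tail, b = false := by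
  cases l with
  | nil => simp
  | cons x r =>
    intro b hb
    rw [List.tail_cons] at hb
    exact h b (List.mem_cons_of_mem _ hb)

theorem af_suffixOr (l : List Bool) (h : ∀ b ∈ l, b = false) :
    ∀ b ∈ pvSuffixOr l, b = false := by
  induction l with
  | nil => simp [pvSuffixOr]
  | cons x r ih =>
    have hx : x = false := h x (by simp)
    have hr : ∀ b ∈ r, b = false := fun b hb => h b (by simp [hb])
    intro b hb
    rw [show pvSuffixOr (x :: r) = (x || (pvSuffixOr r).headD false) :: pvSuffixOr r
        from rfl] at hb
    rcases List.mem_cons.1 hb with rfl | hb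
    · rw [hx, af_headD _ (ih hr)]
      rfl
    · exact ih hr b hb

theorem af_zip (g : Char → Bool) (l1 : List Char) (l2 : List Bool)
    (h : ∀ b ∈ l2, b = false) :
    ∀ b ∈ List.zipWith (fun c b => g c && b) l1 l2, b = false := by
  induction l1 generalizing l2 with
  | nil => simp
  | cons c l1 ih =>
    cases l2 with
    | nil => simp
    | cons x r =>
      intro b hb
      rw [List.zipWith_cons_cons] at hb
      rcases List.mem_cons.1 hb with rfl | hb
      · rw [h x (by simp)]
        simp
      · exact ih r (fun b hb => h b (by simp [hb])) b hb

theorem af_step (s : List Char) (t : GlobTok) (dp : List Bool)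
    (h : ∀ b ∈ dp, b = false) : ∀ b ∈ pvStep s t dp, b = false := by
  cases t with
  | star => exact af_suffixOr dp h
  | question =>
    intro b hb
    rcases List.mem_append.1 hb with hb | hb
    · exact af_zip _ s dp.tail (af_tail dp h) b hb
    · simpa using hb
  | lit a =>
    intro b hb
    rcases List.mem_append.1 hb with hb | hb
    · exact af_zip _ s dp.tail (af_tail dp h) b hb
    · simpa using hb
  | cls neg items =>
    intro b hb
    rcases List.mem_append.1 hb with hb | hb
    · exact af_zip _ s dp.tail (af_tail dp h) b hb
    · simpa using hb

theorem af_of_not_contains (l : List Bool) (h : l.contains true = false) :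
    ∀ b ∈ l, b = false := by
  intro b hb
  cases b with
  | false => rfl
  | true => simp at h; exact absurd hb h

theorem af_foldl (s : List Char) (rest : List GlobTok) (dp : List Bool)
    (h : ∀ b ∈ dp, b = false) :
    ∀ b ∈ rest.foldl (fun dp t => pvStep s t dp) dp, b = false := by
  induction rest generalizing dp with
  | nil => exact h
  | cons t rest ih => exact ih _ (af_step s t dp h)

-- the early-exit loop computes the same as the plain foldl
theorem dploop_eq_foldl (s : List Char) (rev : List GlobTok) (dp : List Bool) :
    pvDPLoop s rev dp = (rev.foldl (fun dp t => pvStep s t dp) dp).headD false := by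
  induction rev generalizing dp with
  | nil => rfl
  | cons t rest ih =>
    show (if (pvStep s t dp).contains true then pvDPLoop s rest (pvStep s t dp) else false)
        = _
    by_cases hc : (pvStep s t dp).contains true
    · rw [if_pos hc, ih, List.foldl_cons]
    · rw [if_neg hc, List.foldl_cons]
      have haf := af_foldl s rest _ (af_of_not_contains _ (by simpa using hc))
      exact (af_headD _ haf).symm

theorem glob_dp_eq (toks : List GlobTok) (s : List Char) :
    pvGlobDP toks s = pvGlobMatch toks s := by
  unfold pvGlobDP
  rw [dploop_eq_foldl, List.foldl_reverse]
  rw [foldr_spec, map_tails_headD]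

-- a pattern without '*', '?', '[' parses to literal tokens only
theorem parse_no_special_F (cs : List Char)
    (h : cs.contains '*' = false ∧ cs.contains '?' = false ∧ cs.contains '[' = false) :
    pvParseGlobF cs.length cs = cs.map .lit := by
  induction cs with
  | nil => rfl
  | cons c rest ih =>
    simp only [List.contains_cons, Bool.or_eq_false_iff, beq_eq_false_iff_ne] at h
    obtain ⟨⟨h1, h1'⟩, ⟨h2, h2'⟩, ⟨h3, h3'⟩⟩ := h
    rw [List.length_cons, List.map_cons]
    rw [pvParseGlobF.eq_def]
    split
    · omega
    · simp_all
    · simp_all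
    · simp_all
    · simp_all
    · rename_i heqc
      injection heqc with hc hr
      subst hc
      subst hr
      rename_i fuel _ _ _ heqf
      have hf : fuel = rest.length := by omega
      subst hf
      rw [ih ⟨h1', h2', h3'⟩]

-- literal tokens match exactly equality of the char lists
theorem match_lits (cs ds : List Char) :
    pvGlobMatch (cs.map .lit) ds = (cs == ds) := by
  induction cs generalizing ds with
  | nil =>
    cases ds with
    | nil => simp [pvGlobMatch]
    | cons d ds => simp [pvGlobMatch]
  | cons c cs ih =>
    cases ds with
    | nil => simp [List.map_cons, glob_nonstar_nil (GlobTok.lit c) _ (by simp)]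
    | cons d ds =>
      rw [List.map_cons, glob_nonstar_cons (GlobTok.lit c) _ (by simp),
        show pvCharOk (GlobTok.lit c) d = (c == d) from rfl, ih]
      simp [List.cons_beq_cons]

-- B's per-pair test computes exactly fnmatch on the lowered strings
theorem hit_compile (p name : String) :
    pvHit (PySem.Str.lower name) (pvCompile p)
      = pyFnmatch (PySem.Str.lower name) (PySem.Str.lower p) := by
  unfold pvCompile
  set lp := PySem.Str.lower p
  set low := PySem.Str.lower name
  by_cases hs : (lp.toList.contains '*' || lp.toList.contains '?'
      || lp.toList.contains '[') = true
  · rw [if_pos hs]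
    show pvGlobDP (pvParseGlob lp.toList) low.toList = _
    rw [glob_dp_eq]
    rfl
  · rw [if_neg hs]
    show (low == lp) = pyFnmatch low lp
    simp only [Bool.or_eq_true, not_or, Bool.not_eq_true] at hs
    unfold pyFnmatch pvParseGlob
    rw [parse_no_special_F lp.toList ⟨hs.1.1, hs.1.2, hs.2⟩, match_lits]
    have h1 : (low == lp) = true ↔ (lp.toList == low.toList) = true := by
      rw [beq_iff_eq, beq_iff_eq, String.toList_inj]
      exact eq_comm
    cases hb : (low == lp) with
    | true => exact ((h1.1 hb).symm)
    | false =>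
      cases hc : (lp.toList == low.toList) with
      | true => exact absurd (h1.2 hc) (by simp [hb])
      | false => rfl

-- membership in a "skip matched, then filtered add" fold over a Set
theorem mem_foldl_add {α β : Type} [BEq β] [LawfulBEq β] (l : List α) (t : α → Bool)
    (k : α → β) (m : PySem.Set β) (x : β) :
    (x ∈ l.foldl (fun m a =>
        if m.contains (k a) then m
        else if t a then PySem.Set.add m (k a) else m) m) ↔
      x ∈ m ∨ ∃ a ∈ l, t a = true ∧ x = k a := by
  induction l generalizing m with
  | nil => simp
  | cons a l ih =>
    simp only [List.foldl_cons]
    by_cases hc : m.contains (k a) = true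
    · rw [if_pos hc, ih]
      constructor
      · rintro (h1 | ⟨b, hb, hb2, hb3⟩)
        · exact .inl h1
        · exact .inr ⟨b, by simp [hb], hb2, hb3⟩
      · rintro (h1 | ⟨b, hb, hb2, hb3⟩)
        · exact .inl h1
        · rcases List.mem_cons.1 hb with rfl | hb
          · subst hb3; exact .inl ((PySem.Set.contains_iff _ _).1 hc)
          · exact .inr ⟨b, hb, hb2, hb3⟩
    · rw [if_neg hc]
      by_cases h : t a = true
      · rw [if_pos h, ih, PySem.Set.mem_add]
        constructor
        · rintro (⟨h1 | h1⟩ | ⟨b, hb, hb2, hb3⟩)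
          · exact .inl h1
          · exact .inr ⟨a, by simp, h, h1⟩
          · exact .inr ⟨b, by simp [hb], hb2, hb3⟩
        · rintro (h1 | ⟨b, hb, hb2, hb3⟩)
          · exact .inl (.inl h1)
          · rcases List.mem_cons.1 hb with rfl | hb
            · exact .inl (.inr hb3)
            · exact .inr ⟨b, hb, hb2, hb3⟩
      · rw [if_neg h, ih]
        constructor
        · rintro (h1 | ⟨b, hb, hb2, hb3⟩)
          · exact .inl h1
          · exact .inr ⟨b, by simp [hb], hb2, hb3⟩
        · rintro (h1 | ⟨b, hb, hb2, hb3⟩)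
          · exact .inl h1
          · rcases List.mem_cons.1 hb with rfl | hb
            · exact absurd hb2 h
            · exact .inr ⟨b, hb, hb2, hb3⟩

theorem nodup_foldl_add {α β : Type} [BEq β] [LawfulBEq β] (l : List α) (t : α → Bool)
    (k : α → β) (m : PySem.Set β) (hm : m.Nodup) :
    (l.foldl (fun m a =>
        if m.contains (k a) then m
        else if t a then PySem.Set.add m (k a) else m) m).Nodup := by
  induction l generalizing m with
  | nil => exact hm
  | cons a l ih =>
    simp only [List.foldl_cons]
    split
    · exact ih _ hm
    · split
      · exact ih _ (PySem.Set.nodup_add _ _ hm)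
      · exact ih _ hm

theorem evaluate_status_eq : ∀ (patterns filenames : List String),
    evaluate_status patterns filenames = evaluate_status_alt patterns filenames := by
  intro patterns filenames
  unfold evaluate_status evaluate_status_alt
  by_cases hf : filenames = []
  · simp [hf]
  simp only [hf, if_false]
  -- A's count is a countP
  have hA : ∀ (ps : List String) (acc : Int),
      ps.foldl (fun acc pattern =>
        if pattern_matches_any_file pattern filenames then acc + 1 else acc) acc
      = acc + (ps.countP (fun p => pattern_matches_any_file p filenames) : Int) := by
    intro ps
    induction ps with
    | nil => simp
    | cons p ps ih =>
      intro acc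
      by_cases h : pattern_matches_any_file p filenames
      · simp [h, ih]; ring
      · simp [h, ih]
  -- B's set, characterised
  set cp := patterns.map pvCompile with hcp
  set S := filenames.foldl
      (fun m name =>
        let low := PySem.Str.lower name
        (PySem.List.enumerate cp).foldl
          (fun m ip =>
            if m.contains ip.1 then m
            else if pvHit low ip.2 then PySem.Set.add m ip.1 else m) m)
      PySem.Set.empty with hS
  have hmemS : ∀ x : Int, x ∈ S ↔
      ∃ name ∈ filenames, ∃ ip ∈ PySem.List.enumerate cp,
        pvHit (PySem.Str.lower name) ip.2 = true ∧ x = ip.1 := by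
    intro x
    rw [hS]
    have key : ∀ (fs : List String) (m : PySem.Set Int),
        (x ∈ fs.foldl (fun m name =>
          let low := PySem.Str.lower name
          (PySem.List.enumerate cp).foldl
            (fun m ip =>
              if m.contains ip.1 then m
              else if pvHit low ip.2 then PySem.Set.add m ip.1 else m) m) m) ↔
        x ∈ m ∨ ∃ name ∈ fs, ∃ ip ∈ PySem.List.enumerate cp,
          pvHit (PySem.Str.lower name) ip.2 = true ∧ x = ip.1 := by
      intro fs
      induction fs with
      | nil => simp
      | cons name fs ih =>
        intro m
        simp only [List.foldl_cons]
        rw [ih]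
        constructor
        · rintro (h1 | ⟨n, hn, ip, hip, h2, h3⟩)
          · rcases (mem_foldl_add _ _ _ _ _).1 h1 with h1 | ⟨ip, hip, h2, h3⟩
            · exact .inl h1
            · exact .inr ⟨name, by simp, ip, hip, h2, h3⟩
          · exact .inr ⟨n, by simp [hn], ip, hip, h2, h3⟩
        · rintro (h1 | ⟨n, hn, ip, hip, h2, h3⟩)
          · exact .inl ((mem_foldl_add _ _ _ _ _).2 (.inl h1))
          · rcases List.mem_cons.1 hn with rfl | hn
            · exact .inl ((mem_foldl_add _ _ _ _ _).2 (.inr ⟨ip, hip, h2, h3⟩))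
            · exact .inr ⟨n, hn, ip, hip, h2, h3⟩
    rw [key filenames PySem.Set.empty]
    simp [PySem.Set.empty]
  have hnodupS : S.Nodup := by
    rw [hS]
    have key : ∀ (fs : List String) (m : PySem.Set Int), m.Nodup →
        (fs.foldl (fun m name =>
          let low := PySem.Str.lower name
          (PySem.List.enumerate cp).foldl
            (fun m ip =>
              if m.contains ip.1 then m
              else if pvHit low ip.2 then PySem.Set.add m ip.1 else m) m) m).Nodup := by
      intro fs
      induction fs with
      | nil => exact fun m h => h
      | cons name fs ih => exact fun m h => ih _ (nodup_foldl_add _ _ _ _ h)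
    exact key filenames PySem.Set.empty (by simp [PySem.Set.empty])
  -- the reference nodup list of matched indices
  set L : List Int := ((PySem.List.enumerate cp).filter
      (fun ip => filenames.any
        (fun name => pvHit (PySem.Str.lower name) ip.2))).map (·.1) with hL
  have hnodupL : L.Nodup := by
    rw [hL]
    have hp : ((PySem.List.enumerate cp).filter
        (fun ip => filenames.any
          (fun name => pvHit (PySem.Str.lower name) ip.2))).Pairwise
        (fun p q => p.1 < q.1) :=
      (PySem.List.pairwise_lt_enumerate cp 0).filter _
    have hp2 : (((PySem.List.enumerate cp).filter
        (fun ip => filenames.any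
          (fun name => pvHit (PySem.Str.lower name) ip.2))).map
        (·.1)).Pairwise (fun (a b : Int) => a < b) :=
      List.Pairwise.map _ (fun _ _ h => h) hp
    exact hp2.imp (fun h => ne_of_lt h)
  have hmemL : ∀ x : Int, x ∈ L ↔
      ∃ name ∈ filenames, ∃ ip ∈ PySem.List.enumerate cp,
        pvHit (PySem.Str.lower name) ip.2 = true ∧ x = ip.1 := by
    intro x
    rw [hL]
    simp only [List.mem_map, List.mem_filter, List.any_eq_true]
    constructor
    · rintro ⟨ip, ⟨hip, n, hn, ht⟩, rfl⟩
      exact ⟨n, hn, ip, hip, ht, rfl⟩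
    · rintro ⟨n, hn, ip, hip, ht, rfl⟩
      exact ⟨ip, ⟨hip, n, hn, ht⟩, rfl⟩
  have hperm : S.Perm L :=
    (List.perm_ext_iff_of_nodup hnodupS hnodupL).2 (fun x => (hmemS x).trans (hmemL x).symm)
  have hLlen : L.length = patterns.countP (fun p => pattern_matches_any_file p filenames) := by
    rw [hL, List.length_map, ← List.countP_eq_length_filter]
    have h1 : (PySem.List.enumerate cp).countP
        (fun ip => filenames.any
          (fun name => pvHit (PySem.Str.lower name) ip.2))
        = ((PySem.List.enumerate cp).map (·.2)).countP
            (fun e => filenames.any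
              (fun name => pvHit (PySem.Str.lower name) e)) := by
      rw [List.countP_map]
      rfl
    rw [h1, PySem.List.map_snd_enumerate, hcp, List.countP_map]
    apply List.countP_congr
    intro p _
    have hb : (filenames.any fun name => pvHit (PySem.Str.lower name) (pvCompile p))
        = pattern_matches_any_file p filenames := by
      unfold pattern_matches_any_file
      rw [show (fun name => pvHit (PySem.Str.lower name) (pvCompile p))
            = (fun name => pyFnmatch (PySem.Str.lower name) (PySem.Str.lower p))
          from funext (fun name => hit_compile p name)]
    simp only [Function.comp_apply, hb]
  have hcount : PySem.Set.len S = patterns.foldl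
      (fun acc pattern =>
        if pattern_matches_any_file pattern filenames then acc + 1 else acc) (0 : Int) := by
    rw [hA patterns 0, PySem.Set.len, hperm.length_eq, hLlen]
    simp
  rw [← hcount]

-- ===== VERDICT (by name: the statement is the Claim_ definition above) =====
theorem evaluate_status_spec : Claim_equal_evaluate_status := by
  intro patterns filenames _
  unfold Spec_evaluate_status
  exact evaluate_status_eq patterns filenames
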